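-- pv_equiv track=rewrite | github.com/JasonGlazer/createRulesetProjectDescription | energyplus_rpd/translator.py | do_chiller_and_pump_share_branch
-- ===== SOURCE A (Python) =====
-- def do_chiller_and_pump_share_branch(chiller_name, list_of_dict, side_of_loop):
--     answer = False
--     chiller_branch_name = ''
--     # find the branch used by the chiller
--     for row in list_of_dict:
--         if row['Side'].lower() == side_of_loop.lower():
--             if chiller_name.lower() == row['Component Name'].lower():
--                 chiller_branch_name = row['Branch Name']
--                 break
--     # find if a pump is on the same branch
--     if chiller_branch_name:
--         for row in list_of_dict:
--             if chiller_branch_name == row['Branch Name']: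
--                 if 'pump' in row['Component Type'].lower():
--                     answer = True
--                     break
--     return answer
-- ===== SOURCE B (Python) =====
-- def do_chiller_and_pump_share_branch(chiller_name, list_of_dict, side_of_loop):
--     # One pass: remember the chiller's branch (first match) and collect every
--     # branch that carries a pump; answer by a set lookup afterwards.
--     side = side_of_loop.lower()
--     target = chiller_name.lower()
--     chiller_branch = None
--     pump_branches = set()
--     for row in list_of_dict:
--         if chiller_branch is None and row['Side'].lower() == side \
--                 and row['Component Name'].lower() == target:
--             chiller_branch = row['Branch Name']
--         if 'pump' in row['Component Type'].lower():
--             pump_branches.add(row['Branch Name'])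
--     return bool(chiller_branch) and chiller_branch in pump_branches
-- ===== Notes on version B (the rewrite author's own statement) =====
-- stated objective: alternative
-- what changed: Replaces A's two dependent scans (find the chiller's branch, then rescan the whole list for a pump on it) with a single pass that records the chiller's branch once and builds a set of all pump-carrying branches, finishing with one set-membership test.
-- outside the precondition, e.g. on do_chiller_and_pump_share_branch('c', [{'Side': 'x'}], 'y'): A returns False, B raises KeyError
import Mathlib
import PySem

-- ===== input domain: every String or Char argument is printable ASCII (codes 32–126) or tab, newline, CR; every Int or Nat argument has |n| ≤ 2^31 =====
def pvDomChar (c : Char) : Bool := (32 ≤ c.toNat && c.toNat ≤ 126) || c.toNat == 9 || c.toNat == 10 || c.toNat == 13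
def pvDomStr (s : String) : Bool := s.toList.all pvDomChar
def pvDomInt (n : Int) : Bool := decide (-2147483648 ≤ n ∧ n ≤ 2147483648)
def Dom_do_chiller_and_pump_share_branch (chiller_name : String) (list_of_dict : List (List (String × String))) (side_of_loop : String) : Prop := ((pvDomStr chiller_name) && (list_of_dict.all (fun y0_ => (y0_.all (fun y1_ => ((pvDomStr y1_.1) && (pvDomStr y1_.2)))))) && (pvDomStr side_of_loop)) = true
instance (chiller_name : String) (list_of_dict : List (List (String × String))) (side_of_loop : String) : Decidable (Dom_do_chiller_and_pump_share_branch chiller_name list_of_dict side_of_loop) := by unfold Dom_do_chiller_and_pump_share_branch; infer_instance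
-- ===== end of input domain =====

-- B replaces A's two dependent scans by one pass that also builds a set of pump branches; objective: alternative decomposition (same asymptotic cost on these inputs).

-- row['k'] — exact on inputs satisfying Pre_ (every row carries the four keys; Python raises KeyError where get? is none)
def pvGet (row : List (String × String)) (k : String) : String :=
  ((PySem.Dict.mk row).get? k).getD ""

-- ===== PORT A =====
-- first loop of A: find the branch used by the chiller (break at first match)
def pvFindChillerBranch (chiller_name side_of_loop : String) : List (List (String × String)) → String
  | [] => ""
  | row :: rest =>
    if PySem.Str.lower (pvGet row "Side") == PySem.Str.lower side_of_loop
        && PySem.Str.lower chiller_name == PySem.Str.lower (pvGet row "Component Name") then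
      pvGet row "Branch Name"
    else
      pvFindChillerBranch chiller_name side_of_loop rest

-- second loop of A: is a pump on that branch (break at first match)
def pvPumpOnBranch (branch : String) : List (List (String × String)) → Bool
  | [] => false
  | row :: rest =>
    if branch == pvGet row "Branch Name"
        && PySem.Str.isIn "pump" (PySem.Str.lower (pvGet row "Component Type")) then
      true
    else
      pvPumpOnBranch branch rest

def do_chiller_and_pump_share_branch (chiller_name : String) (list_of_dict : List (List (String × String))) (side_of_loop : String) : Bool :=
  let chiller_branch_name := pvFindChillerBranch chiller_name side_of_loop list_of_dict
  if chiller_branch_name ≠ "" then pvPumpOnBranch chiller_branch_name list_of_dict else false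

-- ===== PORT B =====
-- one iteration of B's single loop over the rows
def pvStep (target side : String) (st : Option String × PySem.Set String) (row : List (String × String)) : Option String × PySem.Set String :=
  let st1 := if st.1.isNone && (PySem.Str.lower (pvGet row "Side") == side)
                && (PySem.Str.lower (pvGet row "Component Name") == target) then
      (some (pvGet row "Branch Name"), st.2)
    else st
  if PySem.Str.isIn "pump" (PySem.Str.lower (pvGet row "Component Type")) then
    (st1.1, PySem.Set.add st1.2 (pvGet row "Branch Name"))
  else st1

def do_chiller_and_pump_share_branch_alt (chiller_name : String) (list_of_dict : List (List (String × String))) (side_of_loop : String) : Bool :=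
  let side := PySem.Str.lower side_of_loop
  let target := PySem.Str.lower chiller_name
  let st := list_of_dict.foldl (pvStep target side) (none, PySem.Set.empty)
  match st.1 with
  | none => false
  | some b => b ≠ "" && PySem.Set.contains st.2 b

-- ===== PRECONDITION & SPEC =====
-- Pre_ excludes lists with a row missing one of the four keys 'Side', 'Component Name', 'Branch Name', 'Component Type':
-- there Python raises KeyError at some scan position (A may still return False when its breaks/guards skip the faulty key; B raises).
def Pre_do_chiller_and_pump_share_branch (chiller_name : String) (list_of_dict : List (List (String × String))) (side_of_loop : String) : Prop :=
  ∀ row ∈ list_of_dict,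
    ((PySem.Dict.mk row).get? "Side").isSome ∧ ((PySem.Dict.mk row).get? "Component Name").isSome
      ∧ ((PySem.Dict.mk row).get? "Branch Name").isSome ∧ ((PySem.Dict.mk row).get? "Component Type").isSome
instance (chiller_name : String) (list_of_dict : List (List (String × String))) (side_of_loop : String) : Decidable (Pre_do_chiller_and_pump_share_branch chiller_name list_of_dict side_of_loop) := by unfold Pre_do_chiller_and_pump_share_branch; infer_instance

def pvWitness_do_chiller_and_pump_share_branch : String × (List (List (String × String))) × String :=
  ("ch1", [[("Side", "Demand"), ("Component Name", "CH1"), ("Branch Name", "b1"), ("Component Type", "Pump:VariableSpeed")]], "demand")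

def Spec_do_chiller_and_pump_share_branch (chiller_name : String) (list_of_dict : List (List (String × String))) (side_of_loop : String) (out : Bool) : Prop := out = do_chiller_and_pump_share_branch_alt chiller_name list_of_dict side_of_loop
instance (chiller_name : String) (list_of_dict : List (List (String × String))) (side_of_loop : String) (out : Bool) : Decidable (Spec_do_chiller_and_pump_share_branch chiller_name list_of_dict side_of_loop out) := by unfold Spec_do_chiller_and_pump_share_branch; infer_instance

-- ===== CLAIM (what is proved, stated in full; the proofs are below) =====
def Claim_equal_do_chiller_and_pump_share_branch : Prop := ∀ (chiller_name : String) (list_of_dict : List (List (String × String))) (side_of_loop : String), Dom_do_chiller_and_pump_share_branch chiller_name list_of_dict side_of_loop → Pre_do_chiller_and_pump_share_branch chiller_name list_of_dict side_of_loop → Spec_do_chiller_and_pump_share_branch chiller_name list_of_dict side_of_loop (do_chiller_and_pump_share_branch chiller_name list_of_dict side_of_loop)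

-- ===== LEMMAS AND PROOFS =====

-- option form of A's first loop (proof helper)
def pvFind? (t sd : String) : List (List (String × String)) → Option String
  | [] => none
  | row :: rest =>
    if (PySem.Str.lower (pvGet row "Side") == sd)
        && (PySem.Str.lower (pvGet row "Component Name") == t) then
      some (pvGet row "Branch Name")
    else pvFind? t sd rest

lemma pvFind?_eq (cn sl : String) (L : List (List (String × String))) :
    pvFindChillerBranch cn sl L = (pvFind? (PySem.Str.lower cn) (PySem.Str.lower sl) L).getD "" := by
  induction L with
  | nil => rfl
  | cons row rest ih =>
    simp only [pvFindChillerBranch, pvFind?]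
    have : (PySem.Str.lower cn == PySem.Str.lower (pvGet row "Component Name"))
        = (PySem.Str.lower (pvGet row "Component Name") == PySem.Str.lower cn) := by
      simp [BEq.comm]
    rw [this]
    split_ifs with h <;> simp [ih]

lemma pvStep_fst (t sd : String) (L : List (List (String × String))) (o : Option String) (s : PySem.Set String) :
    (L.foldl (pvStep t sd) (o, s)).1 = match o with | some x => some x | none => pvFind? t sd L := by
  induction L generalizing o s with
  | nil => cases o <;> rfl
  | cons row rest ih =>
    simp only [List.foldl_cons]
    have hfst : (pvStep t sd (o, s) row).1
        = if o.isNone && (PySem.Str.lower (pvGet row "Side") == sd)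
            && (PySem.Str.lower (pvGet row "Component Name") == t) then some (pvGet row "Branch Name") else o := by
      simp only [pvStep]
      split_ifs <;> simp_all
    have h2 := ih (pvStep t sd (o, s) row).1 (pvStep t sd (o, s) row).2
    simp only [Prod.mk.eta] at h2
    rw [h2, hfst]
    cases o with
    | some x => simp
    | none =>
      simp only [Option.isNone_none, Bool.true_and, pvFind?]
      split_ifs with h <;> simp

lemma pvStep_snd_mem (t sd : String) (L : List (List (String × String))) (o : Option String) (s : PySem.Set String) (b : String) :
    b ∈ (L.foldl (pvStep t sd) (o, s)).2 ↔
      b ∈ s ∨ ∃ row ∈ L, PySem.Str.isIn "pump" (PySem.Str.lower (pvGet row "Component Type")) = true ∧ pvGet row "Branch Name" = b := by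
  induction L generalizing o s with
  | nil => simp
  | cons row rest ih =>
    simp only [List.foldl_cons]
    have hsnd : (pvStep t sd (o, s) row).2
        = if PySem.Str.isIn "pump" (PySem.Str.lower (pvGet row "Component Type")) then
            PySem.Set.add s (pvGet row "Branch Name")
          else s := by
      simp only [pvStep]
      split_ifs <;> simp_all
    have h2 := ih (pvStep t sd (o, s) row).1 (pvStep t sd (o, s) row).2
    simp only [Prod.mk.eta] at h2
    rw [h2, hsnd]
    split_ifs with h
    · rw [PySem.Set.mem_add]
      constructor
      · rintro (⟨hb | hb⟩ | hb)
        · exact Or.inl hb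
        · exact Or.inr ⟨row, by simp, h, hb.symm⟩
        · obtain ⟨r, hr, hp, hbn⟩ := hb; exact Or.inr ⟨r, by simp [hr], hp, hbn⟩
      · rintro (hb | ⟨r, hr, hp, hbn⟩)
        · exact Or.inl (Or.inl hb)
        · rcases List.mem_cons.mp hr with rfl | hr
          · exact Or.inl (Or.inr hbn.symm)
          · exact Or.inr ⟨r, hr, hp, hbn⟩
    · constructor
      · rintro (hb | ⟨r, hr, hp, hbn⟩)
        · exact Or.inl hb
        · exact Or.inr ⟨r, by simp [hr], hp, hbn⟩
      · rintro (hb | ⟨r, hr, hp, hbn⟩)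
        · exact Or.inl hb
        · rcases List.mem_cons.mp hr with rfl | hr
          · exact absurd hp h
          · exact Or.inr ⟨r, hr, hp, hbn⟩

lemma pvPumpOnBranch_iff (b : String) (L : List (List (String × String))) :
    pvPumpOnBranch b L = true ↔
      ∃ row ∈ L, PySem.Str.isIn "pump" (PySem.Str.lower (pvGet row "Component Type")) = true ∧ pvGet row "Branch Name" = b := by
  induction L with
  | nil => simp [pvPumpOnBranch]
  | cons row rest ih =>
    simp only [pvPumpOnBranch]
    split_ifs with h
    · simp only [true_iff]
      rw [Bool.and_eq_true] at h
      exact ⟨row, by simp, h.2, (beq_iff_eq.mp h.1).symm⟩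
    · rw [ih]
      constructor
      · rintro ⟨r, hr, hp, hbn⟩; exact ⟨r, by simp [hr], hp, hbn⟩
      · rintro ⟨r, hr, hp, hbn⟩
        rcases List.mem_cons.mp hr with rfl | hr
        · refine absurd ?_ h
          rw [hbn]
          simp only [beq_self_eq_true, Bool.true_and]
          exact hp
        · exact ⟨r, hr, hp, hbn⟩

-- ===== VERDICT (by name: the statement is the Claim_ definition above) =====
theorem do_chiller_and_pump_share_branch_spec : Claim_equal_do_chiller_and_pump_share_branch := by
  intro cn L sl _ _
  unfold Spec_do_chiller_and_pump_share_branch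
  unfold do_chiller_and_pump_share_branch do_chiller_and_pump_share_branch_alt
  simp only [pvFind?_eq, pvStep_fst]
  cases hf : pvFind? (PySem.Str.lower cn) (PySem.Str.lower sl) L with
  | none => simp
  | some b =>
    simp only [Option.getD_some]
    by_cases hb : b = ""
    · simp [hb]
    · simp only [ne_eq, hb, not_false_iff, if_true]
      have hc : PySem.Set.contains (L.foldl (pvStep (PySem.Str.lower cn) (PySem.Str.lower sl)) (none, PySem.Set.empty)).2 b
          = pvPumpOnBranch b L := by
        by_cases hp : pvPumpOnBranch b L = true
        · rw [hp, (PySem.Set.contains_iff _ _), pvStep_snd_mem]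
          exact Or.inr ((pvPumpOnBranch_iff b L).mp hp)
        · rw [Bool.eq_false_iff.mpr hp, ← Bool.not_eq_true, (PySem.Set.contains_iff _ _), pvStep_snd_mem]
          rintro (h | h)
          · simp at h
          · exact hp ((pvPumpOnBranch_iff b L).mpr h)
      rw [hc]
      simp
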